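-- pv_equiv track=rewrite | github.com/SleepyAngshu/3D_Pac_Man-with-Glut- | Sec04_21201160-22301047-22299019_Summer25.py | compute_distance_map
-- ===== SOURCE A (Python) =====
-- MAZE_WIDTH = 19
--
-- MAZE_HEIGHT = 21
--
-- maze = [
--     [1,1,1,1,1,1,1,1,1,0,1,1,1,1,1,1,1,1,1],
--     [1,0,0,0,0,0,0,0,0,0,0,0,0,0,0,0,0,0,1],
--     [1,2,1,1,0,1,1,1,0,1,0,1,1,1,0,1,1,2,1],
--     [1,0,0,0,0,0,0,0,0,0,0,0,0,0,0,0,0,0,1],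
--     [1,0,1,1,0,1,0,1,1,1,1,1,0,1,0,1,1,0,1],
--     [1,0,0,0,0,1,0,0,0,1,0,0,0,1,0,0,0,0,1],
--     [1,0,0,0,0,1,1,1,0,1,0,1,1,1,0,0,0,0,1],
--     [1,1,1,1,0,1,0,0,0,0,0,0,0,1,0,1,1,1,1],
--     [1,1,1,1,0,1,0,1,3,3,3,1,0,1,0,1,1,1,1],
--     [0,0,0,0,0,0,0,1,3,3,3,1,0,0,0,0,0,0,0],
--     [1,1,1,1,0,1,0,1,3,3,3,1,0,1,0,1,1,1,1],
--     [1,1,1,1,0,1,0,1,1,1,1,1,0,1,0,1,1,1,1],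
--     [1,0,0,0,0,1,0,0,0,0,0,0,0,1,0,0,0,0,1],
--     [1,0,0,0,0,0,0,1,1,1,1,1,0,0,0,0,0,0,1],
--     [1,0,1,1,0,1,0,0,0,1,0,0,0,1,0,1,1,0,1],
--     [1,0,0,1,0,1,1,1,0,1,0,1,1,1,0,1,0,0,1],
--     [1,1,0,0,0,0,0,0,0,0,0,0,0,0,0,0,0,1,1],
--     [1,0,1,1,0,1,0,1,1,1,1,1,0,1,0,1,1,0,1],
--     [1,2,0,0,0,0,0,0,0,1,0,0,0,0,0,0,0,2,1],
--     [1,0,0,0,0,0,0,0,0,0,0,0,0,0,0,0,0,0,1],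
--     [1,1,1,1,1,1,1,1,1,0,1,1,1,1,1,1,1,1,1]
-- ]
--
-- def compute_distance_map(target_x, target_y, block_tunnels=True):
--
--     from collections import deque as _deque
--     q = _deque()
--     start = (target_x, target_y)
--     q.append(start)
--     dist = {start: 0}
--     while q:
--         cx, cy = q.popleft()
--         for dx, dy in ((0,1),(0,-1),(-1,0),(1,0)):
--             nx, ny = cx+dx, cy+dy
--
--             if not (0 <= nx < MAZE_WIDTH and 0 <= ny < MAZE_HEIGHT):
--                 continue
--             v = maze[ny][nx]
--             if v == 1:
--                 continue
--             if block_tunnels and v == 4: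
--                 continue
--             if (nx, ny) not in dist:
--                 dist[(nx, ny)] = dist[(cx, cy)] + 1
--                 q.append((nx, ny))
--     return dist
-- ===== SOURCE B (Python) =====
-- MAZE_WIDTH = 19
--
-- MAZE_HEIGHT = 21
--
-- maze = [
--     [1,1,1,1,1,1,1,1,1,0,1,1,1,1,1,1,1,1,1],
--     [1,0,0,0,0,0,0,0,0,0,0,0,0,0,0,0,0,0,1],
--     [1,2,1,1,0,1,1,1,0,1,0,1,1,1,0,1,1,2,1],
--     [1,0,0,0,0,0,0,0,0,0,0,0,0,0,0,0,0,0,1],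
--     [1,0,1,1,0,1,0,1,1,1,1,1,0,1,0,1,1,0,1],
--     [1,0,0,0,0,1,0,0,0,1,0,0,0,1,0,0,0,0,1],
--     [1,0,0,0,0,1,1,1,0,1,0,1,1,1,0,0,0,0,1],
--     [1,1,1,1,0,1,0,0,0,0,0,0,0,1,0,1,1,1,1],
--     [1,1,1,1,0,1,0,1,3,3,3,1,0,1,0,1,1,1,1],
--     [0,0,0,0,0,0,0,1,3,3,3,1,0,0,0,0,0,0,0],
--     [1,1,1,1,0,1,0,1,3,3,3,1,0,1,0,1,1,1,1],
--     [1,1,1,1,0,1,0,1,1,1,1,1,0,1,0,1,1,1,1],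
--     [1,0,0,0,0,1,0,0,0,0,0,0,0,1,0,0,0,0,1],
--     [1,0,0,0,0,0,0,1,1,1,1,1,0,0,0,0,0,0,1],
--     [1,0,1,1,0,1,0,0,0,1,0,0,0,1,0,1,1,0,1],
--     [1,0,0,1,0,1,1,1,0,1,0,1,1,1,0,1,0,0,1],
--     [1,1,0,0,0,0,0,0,0,0,0,0,0,0,0,0,0,1,1],
--     [1,0,1,1,0,1,0,1,1,1,1,1,0,1,0,1,1,0,1],
--     [1,2,0,0,0,0,0,0,0,1,0,0,0,0,0,0,0,2,1],
--     [1,0,0,0,0,0,0,0,0,0,0,0,0,0,0,0,0,0,1],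
--     [1,1,1,1,1,1,1,1,1,0,1,1,1,1,1,1,1,1,1]
-- ]
--
--
-- def compute_distance_map(target_x, target_y, block_tunnels=True):
--     # Layered BFS with NO visited structure: since every edge is a unit step
--     # and passability depends only on the destination cell (so edges between
--     # passable cells are symmetric), a newly reached neighbour can only
--     # collide with the previous, the current or the in-construction layer.
--     # The distance dict is assembled afterwards from the layer index.
--     def passable(x, y):
--         if not (0 <= x < MAZE_WIDTH and 0 <= y < MAZE_HEIGHT):
--             return False
--         v = maze[y][x]
--         return v != 1 and not (block_tunnels and v == 4)
--
--     layers = []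
--     prev, curr = [], [(target_x, target_y)]
--     while curr:
--         layers.append(curr)
--         nxt = []
--         for cx, cy in curr:
--             for n in ((cx, cy + 1), (cx, cy - 1), (cx - 1, cy), (cx + 1, cy)):
--                 if passable(*n) and n not in prev and n not in curr and n not in nxt:
--                     nxt.append(n)
--         prev, curr = curr, nxt
--     return {cell: level for level, layer in enumerate(layers) for cell in layer}
-- ===== Notes on version B (the rewrite author's own statement) =====
-- stated objective: alternative
-- what changed: Replaces the visited-dict + deque BFS by a layered BFS that keeps NO visited structure at all: it exploits the unit-edge/symmetric-passability property of the grid (a newly reached neighbour can only collide with the previous, current or in-construction layer), collects the layers, and assembles the distance dict afterwards from the layer index instead of incrementing a parent distance.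
import Mathlib
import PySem

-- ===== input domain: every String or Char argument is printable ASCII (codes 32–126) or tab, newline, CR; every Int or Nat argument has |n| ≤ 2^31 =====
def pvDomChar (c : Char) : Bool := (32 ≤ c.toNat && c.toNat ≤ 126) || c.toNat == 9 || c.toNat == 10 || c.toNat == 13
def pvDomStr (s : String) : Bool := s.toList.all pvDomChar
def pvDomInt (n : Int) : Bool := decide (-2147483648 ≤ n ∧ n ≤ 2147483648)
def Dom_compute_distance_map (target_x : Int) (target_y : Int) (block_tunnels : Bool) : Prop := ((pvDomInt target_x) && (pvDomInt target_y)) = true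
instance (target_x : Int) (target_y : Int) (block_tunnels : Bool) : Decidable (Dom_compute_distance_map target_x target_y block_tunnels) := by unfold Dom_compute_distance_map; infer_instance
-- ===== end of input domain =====

-- B replaces A's visited-dict + deque BFS by a layered BFS that keeps no visited
-- structure (collisions can only hit the previous/current/next layer on this grid)
-- and assembles the distance dict afterwards from the layer index (objective: alternative).

-- ===== PORT A =====
def pvMaze : List (List Int) := [
  [1,1,1,1,1,1,1,1,1,0,1,1,1,1,1,1,1,1,1],
  [1,0,0,0,0,0,0,0,0,0,0,0,0,0,0,0,0,0,1],
  [1,2,1,1,0,1,1,1,0,1,0,1,1,1,0,1,1,2,1],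
  [1,0,0,0,0,0,0,0,0,0,0,0,0,0,0,0,0,0,1],
  [1,0,1,1,0,1,0,1,1,1,1,1,0,1,0,1,1,0,1],
  [1,0,0,0,0,1,0,0,0,1,0,0,0,1,0,0,0,0,1],
  [1,0,0,0,0,1,1,1,0,1,0,1,1,1,0,0,0,0,1],
  [1,1,1,1,0,1,0,0,0,0,0,0,0,1,0,1,1,1,1],
  [1,1,1,1,0,1,0,1,3,3,3,1,0,1,0,1,1,1,1],
  [0,0,0,0,0,0,0,1,3,3,3,1,0,0,0,0,0,0,0],
  [1,1,1,1,0,1,0,1,3,3,3,1,0,1,0,1,1,1,1],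
  [1,1,1,1,0,1,0,1,1,1,1,1,0,1,0,1,1,1,1],
  [1,0,0,0,0,1,0,0,0,0,0,0,0,1,0,0,0,0,1],
  [1,0,0,0,0,0,0,1,1,1,1,1,0,0,0,0,0,0,1],
  [1,0,1,1,0,1,0,0,0,1,0,0,0,1,0,1,1,0,1],
  [1,0,0,1,0,1,1,1,0,1,0,1,1,1,0,1,0,0,1],
  [1,1,0,0,0,0,0,0,0,0,0,0,0,0,0,0,0,1,1],
  [1,0,1,1,0,1,0,1,1,1,1,1,0,1,0,1,1,0,1],
  [1,2,0,0,0,0,0,0,0,1,0,0,0,0,0,0,0,2,1],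
  [1,0,0,0,0,0,0,0,0,0,0,0,0,0,0,0,0,0,1],
  [1,1,1,1,1,1,1,1,1,0,1,1,1,1,1,1,1,1,1]]

def pvDirs : List (Int × Int) := [(0,1),(0,-1),(-1,0),(1,0)]

-- maze[ny][nx]; both ports only evaluate it after the bounds guard, where pyGet? is some and getD is exact
def pvMazeAt (nx ny : Int) : Int :=
  (PySem.List.pyGet? ((PySem.List.pyGet? pvMaze ny).getD []) nx).getD 0

-- state for A's loop: (dist, queue); measure for termination
abbrev pvState := PySem.Dict (Int × Int) Int × List (Int × Int)

def pvWindow : Finset (Int × Int) :=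
  ((Finset.range 19) ×ˢ (Finset.range 21)).image (fun p => ((p.1 : Int), (p.2 : Int)))

lemma pvWindow_mem (k : Int × Int) :
    k ∈ pvWindow ↔ 0 ≤ k.1 ∧ k.1 < 19 ∧ 0 ≤ k.2 ∧ k.2 < 21 := by
  unfold pvWindow
  rw [Finset.mem_image]
  constructor
  · rintro ⟨p, hp, rfl⟩
    rw [Finset.mem_product] at hp
    obtain ⟨hp1, hp2⟩ := hp
    rw [Finset.mem_range] at hp1
    rw [Finset.mem_range] at hp2
    refine ⟨?_, ?_, ?_, ?_⟩ <;> dsimp only <;> omega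
  · rintro ⟨h1, h2, h3, h4⟩
    refine ⟨(k.1.toNat, k.2.toNat), ?_, ?_⟩
    · rw [Finset.mem_product]
      refine ⟨?_, ?_⟩ <;> rw [Finset.mem_range] <;> dsimp only <;> omega
    · dsimp only
      rw [Int.toNat_of_nonneg h1, Int.toNat_of_nonneg h3]

def pvM (s : pvState) : Nat := 2 * (pvWindow \ s.1.keys.toFinset).card + s.2.length

-- A's inner for-loop body: one (dx,dy) direction with its chain of `continue` guards
def pvStepA (b : Bool) (s : pvState) (c : Int × Int) (dxy : Int × Int) : pvState :=
  if ¬ (0 ≤ c.1 + dxy.1 ∧ c.1 + dxy.1 < 19 ∧ 0 ≤ c.2 + dxy.2 ∧ c.2 + dxy.2 < 21) then s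
  else if pvMazeAt (c.1 + dxy.1) (c.2 + dxy.2) = 1 then s
  else if b ∧ pvMazeAt (c.1 + dxy.1) (c.2 + dxy.2) = 4 then s
  else if s.1.contains (c.1 + dxy.1, c.2 + dxy.2) then s
  else (s.1.insert (c.1 + dxy.1, c.2 + dxy.2) (s.1.getD c 0 + 1), s.2 ++ [(c.1 + dxy.1, c.2 + dxy.2)])

-- termination facts the port cites in decreasing_by
lemma pvStepA_measure (b : Bool) (s : pvState) (c dxy : Int × Int) :
    pvM (pvStepA b s c dxy) ≤ pvM s := by
  unfold pvStepA
  split_ifs with h1 h2 h3 h4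
  all_goals try exact le_rfl
  have hb : 0 ≤ c.1 + dxy.1 ∧ c.1 + dxy.1 < 19 ∧ 0 ≤ c.2 + dxy.2 ∧ c.2 + dxy.2 < 21 := by
    tauto
  have hc : s.1.contains (c.1 + dxy.1, c.2 + dxy.2) = false := by
    simpa using h4
  have hkW : (c.1 + dxy.1, c.2 + dxy.2) ∈ pvWindow := by
    rw [pvWindow_mem]
    exact ⟨hb.1, hb.2.1, hb.2.2.1, hb.2.2.2⟩
  have hknot : (c.1 + dxy.1, c.2 + dxy.2) ∉ s.1.keys := by
    intro hmem
    rw [← PySem.Dict.contains_iff_mem_keys s.1 _] at hmem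
    rw [hc] at hmem
    exact Bool.false_ne_true hmem
  have hkeys := PySem.Dict.keys_insert_of_not_contains s.1 (s.1.getD c 0 + 1) hc
  have hkWS : (c.1 + dxy.1, c.2 + dxy.2) ∈ pvWindow \ s.1.keys.toFinset := by
    rw [Finset.mem_sdiff, List.mem_toFinset]
    exact ⟨hkW, hknot⟩
  have happ : (s.1.keys ++ [(c.1 + dxy.1, c.2 + dxy.2)]).toFinset
      = s.1.keys.toFinset ∪ {(c.1 + dxy.1, c.2 + dxy.2)} := by
    simp
  have hsub : pvWindow \ (s.1.keys ++ [(c.1 + dxy.1, c.2 + dxy.2)]).toFinset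
      = (pvWindow \ s.1.keys.toFinset) \ {(c.1 + dxy.1, c.2 + dxy.2)} := by
    rw [happ]
    ext a
    simp only [Finset.mem_sdiff, Finset.mem_union, Finset.mem_singleton]
    constructor
    · rintro ⟨hW, hn⟩
      exact ⟨⟨hW, fun h => hn (Or.inl h)⟩, fun h => hn (Or.inr h)⟩
    · rintro ⟨⟨hW, hn1⟩, hn2⟩
      exact ⟨hW, fun h => h.elim hn1 hn2⟩
  have hcard : (pvWindow \ (s.1.keys ++ [(c.1 + dxy.1, c.2 + dxy.2)]).toFinset).card
      = (pvWindow \ s.1.keys.toFinset).card - 1 := by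
    rw [hsub, Finset.card_sdiff, Finset.singleton_inter_of_mem hkWS, Finset.card_singleton]
  have hpos : 1 ≤ (pvWindow \ s.1.keys.toFinset).card :=
    Finset.card_pos.2 ⟨_, hkWS⟩
  simp only [pvM, hkeys, hcard, List.length_append, List.length_cons, List.length_nil]
  omega

lemma pvFoldl_measure {α : Type} (g : pvState → α → pvState)
    (hg : ∀ s a, pvM (g s a) ≤ pvM s) :
    ∀ (l : List α) (s : pvState), pvM (l.foldl g s) ≤ pvM s := by
  intro l
  induction l with
  | nil => intro s; exact le_refl _
  | cons a l ih => intro s; exact le_trans (ih (g s a)) (hg s a)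

-- A's while-loop over the deque, popping one cell at a time
def pvLoopA (b : Bool) (d : PySem.Dict (Int × Int) Int) (q : List (Int × Int)) :
    PySem.Dict (Int × Int) Int :=
  match q with
  | [] => d
  | c :: rest =>
      pvLoopA b (pvDirs.foldl (fun s dxy => pvStepA b s c dxy) (d, rest)).1
                (pvDirs.foldl (fun s dxy => pvStepA b s c dxy) (d, rest)).2
termination_by pvM (d, q)
decreasing_by
  have h := pvFoldl_measure (fun s dxy => pvStepA b s c dxy)
    (fun s a => pvStepA_measure b s c a) pvDirs (d, rest)
  simp only [pvM, List.length_cons] at *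
  omega

def compute_distance_map (target_x : Int) (target_y : Int) (block_tunnels : Bool) : List (Int × Int × Int) :=
  (pvLoopA block_tunnels (PySem.Dict.ofList [((target_x, target_y), (0:Int))])
    [(target_x, target_y)]).items.map (fun p => (p.1.1, p.1.2, p.2))

-- ===== PORT B =====
-- Source B's `passable(x, y)`
def pvPass (b : Bool) (x y : Int) : Bool :=
  if ¬ (0 ≤ x ∧ x < 19 ∧ 0 ≤ y ∧ y < 21) then false
  else decide (pvMazeAt x y ≠ 1) && !(b && decide (pvMazeAt x y = 4))

-- Source B's neighbour tuple ((cx,cy+1),(cx,cy-1),(cx-1,cy),(cx+1,cy))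
def pvNbrs (c : Int × Int) : List (Int × Int) :=
  [(c.1, c.2 + 1), (c.1, c.2 - 1), (c.1 - 1, c.2), (c.1 + 1, c.2)]

-- Source B's inner guard: passable and not in prev/curr/nxt, else skip
def pvAddB (b : Bool) (prev curr : List (Int × Int)) (nxt : List (Int × Int))
    (n : Int × Int) : List (Int × Int) :=
  if pvPass b n.1 n.2 = true ∧ n ∉ prev ∧ n ∉ curr ∧ n ∉ nxt then nxt ++ [n] else nxt

-- one level: build the next layer from the current one (Source B's nested for)
def pvNextB (b : Bool) (prev curr : List (Int × Int)) : List (Int × Int) :=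
  curr.foldl (fun nxt c => (pvNbrs c).foldl (pvAddB b prev curr) nxt) []

-- Source B's `while curr:` loop collecting the layers; the fuel argument only makes the
-- recursion structurally total — the equivalence proof shows 400 is never exhausted
def pvLoopB (b : Bool) : Nat → List (List (Int × Int)) → List (Int × Int) → List (Int × Int) → List (List (Int × Int))
  | 0, layers, _, _ => layers
  | Nat.succ fuel, layers, prev, curr =>
      if curr = [] then layers
      else pvLoopB b fuel (layers ++ [curr]) curr (pvNextB b prev curr)

def compute_distance_map_alt (target_x : Int) (target_y : Int) (block_tunnels : Bool) : List (Int × Int × Int) :=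
  -- {cell: level for level, layer in enumerate(layers) for cell in layer}
  ((PySem.List.enumerate (pvLoopB block_tunnels 400 [] [] [(target_x, target_y)]) 0).foldl
      (fun d p => p.2.foldl (fun d c => d.insert c p.1) d)
      (PySem.Dict.empty : PySem.Dict (Int × Int) Int)).items.map (fun p => (p.1.1, p.1.2, p.2))

-- ===== PRECONDITION & SPEC =====
def Spec_compute_distance_map (target_x : Int) (target_y : Int) (block_tunnels : Bool) (out : List (Int × Int × Int)) : Prop := out = compute_distance_map_alt target_x target_y block_tunnels
instance (target_x : Int) (target_y : Int) (block_tunnels : Bool) (out : List (Int × Int × Int)) : Decidable (Spec_compute_distance_map target_x target_y block_tunnels out) := by unfold Spec_compute_distance_map; infer_instance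

-- ===== CLAIM (what is proved, stated in full; the proofs are below) =====
def Claim_equal_compute_distance_map : Prop := ∀ (target_x : Int) (target_y : Int) (block_tunnels : Bool), Dom_compute_distance_map target_x target_y block_tunnels → Spec_compute_distance_map target_x target_y block_tunnels (compute_distance_map target_x target_y block_tunnels)

-- ===== LEMMAS AND PROOFS =====

-- ---- the wavefront view of A's loop (proof-side only) ----

-- processing one whole level of A's queue
def pvLevel (b : Bool) (s : pvState) (f : List (Int × Int)) : pvState :=
  f.foldl (fun s c => pvDirs.foldl (fun s dxy => pvStepA b s c dxy) s) s

lemma pvLevel_measure (b : Bool) (s : pvState) (f : List (Int × Int)) :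
    pvM (pvLevel b s f) ≤ pvM s := by
  refine pvFoldl_measure _ (fun s c => ?_) f s
  refine pvFoldl_measure _ (fun s dxy => ?_) pvDirs s
  exact pvStepA_measure b s c dxy

-- A's loop re-expressed one level at a time
def pvWave (b : Bool) (d : PySem.Dict (Int × Int) Int) (f : List (Int × Int)) :
    PySem.Dict (Int × Int) Int :=
  if f = [] then d
  else pvWave b (pvLevel b (d, []) f).1 (pvLevel b (d, []) f).2
termination_by pvM (d, f)
decreasing_by
  have h := pvLevel_measure b (d, []) f
  have hf : 1 ≤ f.length := List.length_pos_iff.2 (by assumption)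
  simp only [pvM, List.length_nil] at *
  omega

lemma pvStepA_snd (b : Bool) (d : PySem.Dict (Int × Int) Int) (q : List (Int × Int))
    (c dxy : Int × Int) :
    pvStepA b (d, q) c dxy
      = ((pvStepA b (d, []) c dxy).1, q ++ (pvStepA b (d, []) c dxy).2) := by
  simp only [pvStepA]
  split_ifs <;> simp

lemma pvFold_snd (b : Bool) (c : Int × Int) (ds : List (Int × Int)) :
    ∀ (d : PySem.Dict (Int × Int) Int) (q : List (Int × Int)),
    ds.foldl (fun s dxy => pvStepA b s c dxy) (d, q)
      = ((ds.foldl (fun s dxy => pvStepA b s c dxy) (d, [])).1,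
         q ++ (ds.foldl (fun s dxy => pvStepA b s c dxy) (d, [])).2) := by
  induction ds with
  | nil => intro d q; simp
  | cons dxy ds ih =>
    intro d q
    rcases hA : pvStepA b (d, []) c dxy with ⟨D1, Δ⟩
    simp only [List.foldl_cons]
    rw [pvStepA_snd b d q c dxy, pvStepA_snd b d [] c dxy, hA]
    dsimp only
    simp only [List.nil_append]
    rw [ih D1 (q ++ Δ), ih D1 Δ]
    simp

-- key bridge: popping an entire level off the queue equals processing it as one wavefront
lemma pvLoopA_level (b : Bool) :
    ∀ (f : List (Int × Int)) (d : PySem.Dict (Int × Int) Int) (acc : List (Int × Int)),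
    pvLoopA b d (f ++ acc)
      = pvLoopA b (pvLevel b (d, acc) f).1 (pvLevel b (d, acc) f).2 := by
  intro f
  induction f with
  | nil => intro d acc; simp [pvLevel]
  | cons c f ih =>
    intro d acc
    have hL : pvLoopA b d (c :: (f ++ acc))
        = pvLoopA b (pvDirs.foldl (fun s dxy => pvStepA b s c dxy) (d, f ++ acc)).1
                    (pvDirs.foldl (fun s dxy => pvStepA b s c dxy) (d, f ++ acc)).2 := by
      rw [pvLoopA.eq_def]
    rcases hA : pvDirs.foldl (fun s dxy => pvStepA b s c dxy) (d, []) with ⟨D1, Δ⟩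
    rw [List.cons_append, hL, pvFold_snd b c pvDirs d (f ++ acc), hA]
    dsimp only
    rw [List.append_assoc, ih D1 (acc ++ Δ)]
    simp only [pvLevel, List.foldl_cons, pvFold_snd b c pvDirs d acc, hA]

lemma pvLoopA_eq_pvWave (b : Bool) :
    ∀ (d : PySem.Dict (Int × Int) Int) (f : List (Int × Int)),
    pvLoopA b d f = pvWave b d f := by
  intro d f
  generalize hm : pvM (d, f) = n
  induction n using Nat.strong_induction_on generalizing d f with
  | _ n ihn =>
    rw [pvWave.eq_def]
    by_cases hf : f = []
    · subst hf; simp only [if_true]; rw [pvLoopA.eq_def]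
    · simp only [hf, if_false]
      have hlt : pvM (pvLevel b (d, []) f) < n := by
        have h := pvLevel_measure b (d, []) f
        have h1 : 1 ≤ f.length := List.length_pos_iff.2 hf
        subst hm
        simp only [pvM, List.length_nil] at *
        omega
      have := ihn _ hlt (pvLevel b (d, []) f).1 (pvLevel b (d, []) f).2 rfl
      calc pvLoopA b d f = pvLoopA b d (f ++ []) := by simp
        _ = pvLoopA b (pvLevel b (d, []) f).1 (pvLevel b (d, []) f).2 := pvLoopA_level b f d []
        _ = pvWave b (pvLevel b (d, []) f).1 (pvLevel b (d, []) f).2 := this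

-- ---- the layered view: simulation between pvWave and pvLoopB ----

-- (cell, level) pairs of a layer list, levels starting at i
def pvPairsFrom (i : Int) : List (List (Int × Int)) → List ((Int × Int) × Int)
  | [] => []
  | l :: ls => l.map (fun c => (c, i)) ++ pvPairsFrom (i + 1) ls

lemma pvPairsFrom_keys (i : Int) (ls : List (List (Int × Int))) :
    (pvPairsFrom i ls).map Prod.fst = ls.flatten := by
  induction ls generalizing i with
  | nil => rfl
  | cons l ls ih => simp [pvPairsFrom, ih, Function.comp_def]

lemma pvPairsFrom_append_singleton (i : Int) (ls : List (List (Int × Int))) (l : List (Int × Int)) :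
    pvPairsFrom i (ls ++ [l]) = pvPairsFrom i ls ++ l.map (fun c => (c, i + (ls.length : Int))) := by
  induction ls generalizing i with
  | nil => simp [pvPairsFrom]
  | cons l' ls ih =>
    simp only [List.cons_append, pvPairsFrom, ih, List.length_cons, List.append_assoc]
    congr 3
    push_cast
    ring

lemma pvPairsFrom_append_nil (i : Int) (ls : List (List (Int × Int))) :
    pvPairsFrom i (ls ++ [[]]) = pvPairsFrom i ls := by
  simp [pvPairsFrom_append_singleton]

-- edges of the search graph: unit step onto a passable in-bounds cell
def pvEdge (b : Bool) (k n : Int × Int) : Prop :=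
  n ∈ pvNbrs k ∧ pvPass b n.1 n.2 = true

lemma pvNbrs_symm (c n : Int × Int) (h : n ∈ pvNbrs c) : c ∈ pvNbrs n := by
  simp only [pvNbrs, List.mem_cons, List.not_mem_nil, or_false] at h ⊢
  rcases h with rfl | rfl | rfl | rfl <;> simp [Prod.ext_iff]

lemma pvPass_window (b : Bool) (x y : Int) (h : pvPass b x y = true) :
    0 ≤ x ∧ x < 19 ∧ 0 ≤ y ∧ y < 21 := by
  by_contra hc
  unfold pvPass at h
  rw [if_pos hc] at h
  exact Bool.false_ne_true h

-- extending a dict by a fresh layer, all with the same value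
def pvDIns (d : PySem.Dict (Int × Int) Int) (w : Int) (q : List (Int × Int)) :
    PySem.Dict (Int × Int) Int :=
  q.foldl (fun d n => d.insert n w) d

lemma pv_contains_foldl_insert (w : Int) (q : List (Int × Int))
    (d : PySem.Dict (Int × Int) Int) (x : Int × Int) :
    (pvDIns d w q).contains x = (d.contains x || decide (x ∈ q)) := by
  induction q generalizing d with
  | nil => simp [pvDIns]
  | cons n q ih =>
    simp only [pvDIns, List.foldl_cons] at *
    rw [ih, PySem.Dict.contains_insert]
    by_cases hx : x = n
    · simp [hx]
    · have : (x == n) = false := by simpa using hx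
      simp [this, hx, List.mem_cons]

lemma pv_getD_foldl_insert_of_not_mem (w : Int) (q : List (Int × Int))
    (d : PySem.Dict (Int × Int) Int) (x : Int × Int) (hx : x ∉ q) :
    (pvDIns d w q).getD x 0 = d.getD x 0 := by
  induction q generalizing d with
  | nil => rfl
  | cons n q ih =>
    simp only [List.mem_cons, not_or] at hx
    simp only [pvDIns, List.foldl_cons] at *
    rw [ih (d.insert n w) hx.2, PySem.Dict.getD_insert, if_neg hx.1]

lemma pv_items_dIns_fresh (w : Int) (q : List (Int × Int))
    (d : PySem.Dict (Int × Int) Int) (hnd : q.Nodup)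
    (hfresh : ∀ x ∈ q, d.contains x = false) :
    (pvDIns d w q).items = d.items ++ q.map (fun n => (n, w)) := by
  have := PySem.Dict.items_foldl_insert_fresh (l := q) (k := id) (v := fun _ => w)
    (d := d) (by simpa using hfresh) (by simpa using hnd)
  simpa [pvDIns] using this

lemma pv_nodup_keys_dIns (w : Int) (q : List (Int × Int))
    (d : PySem.Dict (Int × Int) Int) (h : d.keys.Nodup) :
    (pvDIns d w q).keys.Nodup :=
  PySem.Dict.nodup_keys_foldl_insert q (fun _ _ => w) d h

-- pvNextB only appends; membership persists
lemma pvAddB_mono (b : Bool) (prev curr q : List (Int × Int)) (n x : Int × Int)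
    (h : x ∈ q) : x ∈ pvAddB b prev curr q n := by
  unfold pvAddB
  split_ifs <;> simp [h]

lemma pvFoldAddB_mono (b : Bool) (prev curr : List (Int × Int))
    (ns : List (Int × Int)) (q : List (Int × Int)) (x : Int × Int) (h : x ∈ q) :
    x ∈ ns.foldl (pvAddB b prev curr) q := by
  induction ns generalizing q with
  | nil => exact h
  | cons n ns ih => exact ih _ (pvAddB_mono b prev curr q n x h)

lemma pvFoldAddB_complete (b : Bool) (prev curr : List (Int × Int))
    (ns : List (Int × Int)) (q : List (Int × Int)) (m : Int × Int)
    (hm : m ∈ ns) (hp : pvPass b m.1 m.2 = true) :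
    m ∈ prev ∨ m ∈ curr ∨ m ∈ ns.foldl (pvAddB b prev curr) q := by
  induction ns generalizing q with
  | nil => cases hm
  | cons n ns ih =>
    rcases List.mem_cons.1 hm with rfl | hm'
    · by_cases hg : pvPass b m.1 m.2 = true ∧ m ∉ prev ∧ m ∉ curr ∧ m ∉ q
      · refine Or.inr (Or.inr ?_)
        refine pvFoldAddB_mono b prev curr ns _ m ?_
        simp [pvAddB, hg]
      · rw [not_and_or, not_and_or, not_and_or] at hg
        by_cases h1 : m ∈ prev
        · exact Or.inl h1
        by_cases h2 : m ∈ curr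
        · exact Or.inr (Or.inl h2)
        have h3 : m ∈ q := by
          rcases hg with h | h | h | h
          · exact absurd hp h
          · exact absurd (not_not.1 h) h1
          · exact absurd (not_not.1 h) h2
          · exact not_not.1 h
        exact Or.inr (Or.inr (pvFoldAddB_mono b prev curr ns _ m (pvAddB_mono b prev curr q _ m h3)))
    · exact ih _ hm'

lemma pvFoldOuter_mono (b : Bool) (prev curr : List (Int × Int))
    (cs : List (Int × Int)) (q : List (Int × Int)) (x : Int × Int) (h : x ∈ q) :
    x ∈ cs.foldl (fun nxt c => (pvNbrs c).foldl (pvAddB b prev curr) nxt) q := by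
  induction cs generalizing q with
  | nil => exact h
  | cons c cs ih => exact ih _ (pvFoldAddB_mono b prev curr (pvNbrs c) q x h)

lemma pvNextB_complete (b : Bool) (prev curr : List (Int × Int))
    (k m : Int × Int) (hk : k ∈ curr) (he : pvEdge b k m) :
    m ∈ prev ∨ m ∈ curr ∨ m ∈ pvNextB b prev curr := by
  obtain ⟨hnb, hp⟩ := he
  have main : ∀ (cs : List (Int × Int)) (q : List (Int × Int)), k ∈ cs →
      m ∈ prev ∨ m ∈ curr ∨ m ∈ cs.foldl (fun nxt c => (pvNbrs c).foldl (pvAddB b prev curr) nxt) q := by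
    intro cs
    induction cs with
    | nil => intro q h; cases h
    | cons c cs ih =>
      intro q hkmem
      rcases List.mem_cons.1 hkmem with rfl | hk'
      · rcases pvFoldAddB_complete b prev curr (pvNbrs k) q m hnb hp with h | h | h
        · exact Or.inl h
        · exact Or.inr (Or.inl h)
        · exact Or.inr (Or.inr (pvFoldOuter_mono b prev curr cs _ m h))
      · exact ih _ hk'
  exact main curr [] hk

-- one direction of A's inner loop against one guarded append of B's
lemma pvStep1 (b : Bool) (layers : List (List (Int × Int))) (prev curr : List (Int × Int))
    (d : PySem.Dict (Int × Int) Int) (L : Int)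
    (hkeys : d.keys = layers.flatten ++ curr)
    (hnd : d.keys.Nodup)
    (hgetD : ∀ c ∈ curr, d.getD c 0 = L)
    (hprev : ∀ x ∈ prev, x ∈ layers.flatten)
    (hC1 : ∀ k ∈ layers.flatten, k ∉ prev → ∀ m, pvEdge b k m → m ∈ layers.flatten)
    (hgood : ∀ c ∈ curr, pvPass b c.1 c.2 = true ∨ layers = [])
    (c n dxy : Int × Int) (hc : c ∈ curr) (hn : (c.1 + dxy.1, c.2 + dxy.2) = n)
    (hnb : n ∈ pvNbrs c)
    (q : List (Int × Int)) (hq1 : q.Nodup)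
    (hq2 : ∀ x ∈ q, pvPass b x.1 x.2 = true ∧ d.contains x = false) :
    pvStepA b (pvDIns d (L+1) q, q) c dxy = (pvDIns d (L+1) (pvAddB b prev curr q n), pvAddB b prev curr q n)
    ∧ (pvAddB b prev curr q n).Nodup
    ∧ (∀ x ∈ pvAddB b prev curr q n, pvPass b x.1 x.2 = true ∧ d.contains x = false) := by
  have hmemd : ∀ x, d.contains x = true ↔ (x ∈ layers.flatten ∨ x ∈ curr) := by
    intro x
    rw [PySem.Dict.contains_iff_mem_keys, hkeys, List.mem_append]
  have hndk : (layers.flatten ++ curr).Nodup := hkeys ▸ hnd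
  have hstep : pvStepA b (pvDIns d (L+1) q, q) c dxy
      = (if ¬ (0 ≤ n.1 ∧ n.1 < 19 ∧ 0 ≤ n.2 ∧ n.2 < 21) then (pvDIns d (L+1) q, q)
         else if pvMazeAt n.1 n.2 = 1 then (pvDIns d (L+1) q, q)
         else if b ∧ pvMazeAt n.1 n.2 = 4 then (pvDIns d (L+1) q, q)
         else if (pvDIns d (L+1) q).contains n then (pvDIns d (L+1) q, q)
         else ((pvDIns d (L+1) q).insert n ((pvDIns d (L+1) q).getD c 0 + 1), q ++ [n])) := by
    have h1 : c.1 + dxy.1 = n.1 := by rw [← hn]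
    have h2 : c.2 + dxy.2 = n.2 := by rw [← hn]
    simp only [pvStepA, h1, h2]
  by_cases hw : 0 ≤ n.1 ∧ n.1 < 19 ∧ 0 ≤ n.2 ∧ n.2 < 21
  case neg =>
    have hpass : pvPass b n.1 n.2 = false := by simp [pvPass, hw]
    have hadd : pvAddB b prev curr q n = q := by
      unfold pvAddB
      rw [if_neg]
      rintro ⟨h, -⟩
      rw [hpass] at h
      exact Bool.false_ne_true h
    rw [hstep, hadd, if_pos hw]
    exact ⟨rfl, hq1, hq2⟩
  case pos =>
  by_cases hm1 : pvMazeAt n.1 n.2 = 1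
  case pos =>
    have hpass : pvPass b n.1 n.2 = false := by simp [pvPass, hw, hm1]
    have hadd : pvAddB b prev curr q n = q := by
      unfold pvAddB
      rw [if_neg]
      rintro ⟨h, -⟩
      rw [hpass] at h
      exact Bool.false_ne_true h
    rw [hstep, if_neg (by simpa using hw), if_pos hm1, hadd]
    exact ⟨rfl, hq1, hq2⟩
  case neg =>
  by_cases hm4 : b = true ∧ pvMazeAt n.1 n.2 = 4
  case pos =>
    have hpass : pvPass b n.1 n.2 = false := by
      simp [pvPass, hw, hm4.1, hm4.2]
    have hadd : pvAddB b prev curr q n = q := by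
      unfold pvAddB
      rw [if_neg]
      rintro ⟨h, -⟩
      rw [hpass] at h
      exact Bool.false_ne_true h
    rw [hstep, if_neg (by simpa using hw), if_neg hm1, if_pos hm4, hadd]
    exact ⟨rfl, hq1, hq2⟩
  case neg =>
  have hpass : pvPass b n.1 n.2 = true := by
    simp only [pvPass, if_neg (show ¬¬ (0 ≤ n.1 ∧ n.1 < 19 ∧ 0 ≤ n.2 ∧ n.2 < 21) from not_not.2 hw)]
    simp only [Bool.and_eq_true, Bool.not_eq_true', Bool.and_eq_false_iff]
    constructor
    · simpa using hm1
    · by_cases hb : b = true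
      · simp [hb]
        intro h4
        exact hm4 ⟨hb, h4⟩
      · simp at hb
        simp [hb]
  have hcont : (pvDIns d (L+1) q).contains n = (d.contains n || decide (n ∈ q)) :=
    pv_contains_foldl_insert (L+1) q d n
  -- the membership bridge: a passable candidate seen in the dict lies in prev/curr/q
  have hbridge : d.contains n = true → n ∈ prev ∨ n ∈ curr := by
    intro hd
    rcases (hmemd n).1 hd with hfl | hcu
    · left
      by_cases hpv : n ∈ prev
      · exact hpv
      · exfalso
        have hlay : layers ≠ [] := by
          intro h0
          rw [h0] at hfl
          simp at hfl
        have hgc : pvPass b c.1 c.2 = true := by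
          rcases hgood c hc with h | h
          · exact h
          · exact absurd h hlay
        have hedge : pvEdge b n c := ⟨pvNbrs_symm c n hnb, hgc⟩
        have hcfl : c ∈ layers.flatten := hC1 n hfl hpv c hedge
        exact absurd hc ((List.disjoint_of_nodup_append hndk) hcfl)
    · right; exact hcu
  by_cases hcn : (d.contains n || decide (n ∈ q)) = true
  case pos =>
    -- already seen: both sides skip
    have hadd : pvAddB b prev curr q n = q := by
      unfold pvAddB
      rw [if_neg]
      rintro ⟨-, hp1, hp2, hp3⟩
      rcases Bool.or_eq_true_iff.1 hcn with hd | hq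
      · rcases hbridge hd with h | h
        · exact hp1 h
        · exact hp2 h
      · exact hp3 (of_decide_eq_true hq)
    rw [hstep, if_neg (by simpa using hw), if_neg hm1, if_neg hm4, if_pos (by rw [hcont]; exact hcn), hadd]
    exact ⟨rfl, hq1, hq2⟩
  case neg =>
    have hcn' : d.contains n = false ∧ n ∉ q := by simpa using hcn
    obtain ⟨hdn, hnq⟩ := hcn'
    have hcq : c ∉ q := by
      intro hcq
      have h1 := (hq2 c hcq).2
      rw [(hmemd c).2 (Or.inr hc)] at h1
      simp at h1
    have hgd : (pvDIns d (L+1) q).getD c 0 = L := by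
      rw [pv_getD_foldl_insert_of_not_mem (L+1) q d c hcq]
      exact hgetD c hc
    have hadd : pvAddB b prev curr q n = q ++ [n] := by
      unfold pvAddB
      rw [if_pos]
      refine ⟨hpass, ?_, ?_, hnq⟩
      · intro hpv
        have : d.contains n = true := (hmemd n).2 (Or.inl (hprev n hpv))
        rw [hdn] at this
        exact Bool.false_ne_true this
      · intro hcu
        have : d.contains n = true := (hmemd n).2 (Or.inr hcu)
        rw [hdn] at this
        exact Bool.false_ne_true this
    have hins : (pvDIns d (L+1) q).insert n (L + 1) = pvDIns d (L+1) (q ++ [n]) := by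
      simp [pvDIns, List.foldl_append]
    rw [hstep, if_neg (by simpa using hw), if_neg hm1, if_neg hm4,
        if_neg (by rw [hcont]; simpa using hcn), hgd, hins, hadd]
    refine ⟨rfl, ?_, ?_⟩
    · rw [List.nodup_append]
      refine ⟨hq1, List.nodup_singleton n, fun a ha bb hbb heq => ?_⟩
      have hab : bb = n := by simpa using hbb
      subst hab
      subst heq
      exact hnq ha
    · intro x hx
      rcases List.mem_append.1 hx with hx | hx
      · exact hq2 x hx
      · rcases List.mem_singleton.1 hx with rfl
        exact ⟨hpass, hdn⟩


-- one cell of the current layer: A's four directions against B's four neighbours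
lemma pvInner (b : Bool) (layers : List (List (Int × Int))) (prev curr : List (Int × Int))
    (d : PySem.Dict (Int × Int) Int) (L : Int)
    (hkeys : d.keys = layers.flatten ++ curr)
    (hnd : d.keys.Nodup)
    (hgetD : ∀ c ∈ curr, d.getD c 0 = L)
    (hprev : ∀ x ∈ prev, x ∈ layers.flatten)
    (hC1 : ∀ k ∈ layers.flatten, k ∉ prev → ∀ m, pvEdge b k m → m ∈ layers.flatten)
    (hgood : ∀ c ∈ curr, pvPass b c.1 c.2 = true ∨ layers = [])
    (c : Int × Int) (hc : c ∈ curr)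
    (q : List (Int × Int)) (hq1 : q.Nodup)
    (hq2 : ∀ x ∈ q, pvPass b x.1 x.2 = true ∧ d.contains x = false) :
    pvDirs.foldl (fun s dxy => pvStepA b s c dxy) (pvDIns d (L+1) q, q)
      = (pvDIns d (L+1) ((pvNbrs c).foldl (pvAddB b prev curr) q), (pvNbrs c).foldl (pvAddB b prev curr) q)
    ∧ ((pvNbrs c).foldl (pvAddB b prev curr) q).Nodup
    ∧ (∀ x ∈ (pvNbrs c).foldl (pvAddB b prev curr) q, pvPass b x.1 x.2 = true ∧ d.contains x = false) := by
  obtain ⟨e1, hn1, hp1⟩ := pvStep1 b layers prev curr d L hkeys hnd hgetD hprev hC1 hgood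
    c (c.1, c.2 + 1) (0, 1) hc (by simp) (by simp [pvNbrs]) q hq1 hq2
  obtain ⟨e2, hn2, hp2⟩ := pvStep1 b layers prev curr d L hkeys hnd hgetD hprev hC1 hgood
    c (c.1, c.2 - 1) (0, -1) hc (by simp [Prod.ext_iff]; omega) (by simp [pvNbrs]) _ hn1 hp1
  obtain ⟨e3, hn3, hp3⟩ := pvStep1 b layers prev curr d L hkeys hnd hgetD hprev hC1 hgood
    c (c.1 - 1, c.2) (-1, 0) hc (by simp [Prod.ext_iff]; omega) (by simp [pvNbrs]) _ hn2 hp2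
  obtain ⟨e4, hn4, hp4⟩ := pvStep1 b layers prev curr d L hkeys hnd hgetD hprev hC1 hgood
    c (c.1 + 1, c.2) (1, 0) hc (by simp) (by simp [pvNbrs]) _ hn3 hp3
  simp only [pvDirs, pvNbrs, List.foldl_cons, List.foldl_nil]
  rw [e1, e2, e3, e4]
  exact ⟨rfl, hn4, hp4⟩

-- a whole layer: A's wavefront step equals B's next-layer construction
lemma pvSim (b : Bool) (layers : List (List (Int × Int))) (prev curr : List (Int × Int))
    (d : PySem.Dict (Int × Int) Int) (L : Int)
    (hkeys : d.keys = layers.flatten ++ curr)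
    (hnd : d.keys.Nodup)
    (hgetD : ∀ c ∈ curr, d.getD c 0 = L)
    (hprev : ∀ x ∈ prev, x ∈ layers.flatten)
    (hC1 : ∀ k ∈ layers.flatten, k ∉ prev → ∀ m, pvEdge b k m → m ∈ layers.flatten)
    (hgood : ∀ c ∈ curr, pvPass b c.1 c.2 = true ∨ layers = []) :
    ∀ (cs : List (Int × Int)), (∀ c ∈ cs, c ∈ curr) →
    ∀ (q : List (Int × Int)), q.Nodup → (∀ x ∈ q, pvPass b x.1 x.2 = true ∧ d.contains x = false) →
    (cs.foldl (fun s c => pvDirs.foldl (fun s dxy => pvStepA b s c dxy) s) (pvDIns d (L+1) q, q)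
      = (pvDIns d (L+1) (cs.foldl (fun nxt c => (pvNbrs c).foldl (pvAddB b prev curr) nxt) q),
         cs.foldl (fun nxt c => (pvNbrs c).foldl (pvAddB b prev curr) nxt) q))
    ∧ (cs.foldl (fun nxt c => (pvNbrs c).foldl (pvAddB b prev curr) nxt) q).Nodup
    ∧ (∀ x ∈ cs.foldl (fun nxt c => (pvNbrs c).foldl (pvAddB b prev curr) nxt) q,
         pvPass b x.1 x.2 = true ∧ d.contains x = false) := by
  intro cs
  induction cs with
  | nil => intro _ q hq1 hq2; exact ⟨rfl, hq1, hq2⟩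
  | cons c cs ih =>
    intro hcs q hq1 hq2
    obtain ⟨e1, hn1, hp1⟩ := pvInner b layers prev curr d L hkeys hnd hgetD hprev hC1 hgood
      c (hcs c List.mem_cons_self) q hq1 hq2
    simp only [List.foldl_cons]
    rw [e1]
    exact ih (fun x hx => hcs x (List.mem_cons_of_mem _ hx)) _ hn1 hp1

lemma pvLevelSim (b : Bool) (layers : List (List (Int × Int))) (prev curr : List (Int × Int))
    (d : PySem.Dict (Int × Int) Int) (L : Int)
    (hkeys : d.keys = layers.flatten ++ curr)
    (hnd : d.keys.Nodup)
    (hgetD : ∀ c ∈ curr, d.getD c 0 = L)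
    (hprev : ∀ x ∈ prev, x ∈ layers.flatten)
    (hC1 : ∀ k ∈ layers.flatten, k ∉ prev → ∀ m, pvEdge b k m → m ∈ layers.flatten)
    (hgood : ∀ c ∈ curr, pvPass b c.1 c.2 = true ∨ layers = []) :
    pvLevel b (d, []) curr = (pvDIns d (L+1) (pvNextB b prev curr), pvNextB b prev curr)
    ∧ (pvNextB b prev curr).Nodup
    ∧ (∀ x ∈ pvNextB b prev curr, pvPass b x.1 x.2 = true ∧ d.contains x = false) := by
  have h := pvSim b layers prev curr d L hkeys hnd hgetD hprev hC1 hgood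
    curr (fun c hc => hc) [] List.nodup_nil (by intro x hx; cases hx)
  exact h


lemma pvPairsFrom_mem_last (i : Int) (ls : List (List (Int × Int))) (curr : List (Int × Int))
    (c : Int × Int) (hc : c ∈ curr) :
    (c, i + (ls.length : Int)) ∈ pvPairsFrom i (ls ++ [curr]) := by
  rw [pvPairsFrom_append_singleton]
  exact List.mem_append_right _ (List.mem_map.2 ⟨c, hc, rfl⟩)

lemma pv_len_flatten (ls : List (List (Int × Int))) (h : ∀ l ∈ ls, l ≠ []) :
    ls.length ≤ ls.flatten.length := by
  induction ls with
  | nil => simp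
  | cons l ls ih =>
    have h1 : 0 < l.length := List.length_pos_iff.2 (h l List.mem_cons_self)
    have h2 := ih (fun x hx => h x (List.mem_cons_of_mem _ hx))
    simp only [List.length_cons, List.flatten_cons, List.length_append]
    omega

lemma pv_card_bound (l : List (Int × Int)) (hnd : l.Nodup) (c0 : Int × Int)
    (h : ∀ k ∈ l, k = c0 ∨ (0 ≤ k.1 ∧ k.1 < 19 ∧ 0 ≤ k.2 ∧ k.2 < 21)) :
    l.length ≤ 400 := by
  have hsub : l.toFinset ⊆ insert c0 pvWindow := by
    intro k hk
    rcases h k (List.mem_toFinset.1 hk) with rfl | hb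
    · exact Finset.mem_insert_self _ _
    · exact Finset.mem_insert_of_mem ((pvWindow_mem k).2 hb)
  have h1 : l.toFinset.card = l.length := List.toFinset_card_of_nodup hnd
  have h2 : l.toFinset.card ≤ (insert c0 pvWindow).card := Finset.card_le_card hsub
  have h3 : (insert c0 pvWindow).card ≤ pvWindow.card + 1 := Finset.card_insert_le _ _
  have h4 : pvWindow.card ≤ 399 := by
    unfold pvWindow
    refine le_trans Finset.card_image_le ?_
    rw [Finset.card_product, Finset.card_range, Finset.card_range]
  omega

-- the fuelled layered loop reproduces the wavefront's dict, layer by layer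
lemma pvMain (b : Bool) (c0 : Int × Int) :
    ∀ (fuel : Nat) (layers : List (List (Int × Int))) (prev curr : List (Int × Int))
      (d : PySem.Dict (Int × Int) Int),
    d.items = pvPairsFrom 0 (layers ++ [curr]) →
    d.keys.Nodup →
    (∀ x ∈ prev, x ∈ layers.flatten) →
    (∀ k ∈ layers.flatten, k ∉ prev → ∀ m, pvEdge b k m → m ∈ layers.flatten) →
    (∀ k ∈ prev, ∀ m, pvEdge b k m → m ∈ layers.flatten ∨ m ∈ curr) →
    (∀ c ∈ curr, pvPass b c.1 c.2 = true ∨ layers = []) →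
    (∀ l ∈ layers, l ≠ []) →
    (∀ k ∈ (layers ++ [curr]).flatten, k = c0 ∨ (0 ≤ k.1 ∧ k.1 < 19 ∧ 0 ≤ k.2 ∧ k.2 < 21)) →
    fuel + layers.length = 400 →
    (pvWave b d curr).items = pvPairsFrom 0 (pvLoopB b fuel layers prev curr)
    ∧ (pvWave b d curr).keys.Nodup := by
  intro fuel
  induction fuel with
  | zero =>
    intro layers prev curr d h1 hnd hprev hC1 hC2 hgood hne hwin hfuel
    have hcurr : curr = [] := by
      by_contra hc
      have hkeys : d.keys = (layers ++ [curr]).flatten := by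
        have : d.keys = (pvPairsFrom 0 (layers ++ [curr])).map Prod.fst := by
          rw [← h1]; rfl
        rw [this, pvPairsFrom_keys]
      have hndf : (layers ++ [curr]).flatten.Nodup := hkeys ▸ hnd
      have hlen : (layers ++ [curr]).length ≤ (layers ++ [curr]).flatten.length :=
        pv_len_flatten _ (by
          intro l hl
          rcases List.mem_append.1 hl with h | h
          · exact hne l h
          · rcases List.mem_singleton.1 h with rfl; exact hc)
      have hcard := pv_card_bound _ hndf c0 hwin
      simp only [List.length_append, List.length_cons, List.length_nil] at hlen
      omega
    subst hcurr
    have hw0 : pvWave b d [] = d := by rw [pvWave.eq_def]; simp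
    rw [hw0]
    simp only [pvLoopB]
    exact ⟨by rw [h1, pvPairsFrom_append_nil], hnd⟩
  | succ f ih =>
    intro layers prev curr d h1 hnd hprev hC1 hC2 hgood hne hwin hfuel
    by_cases hcurr : curr = []
    · subst hcurr
      have hw0 : pvWave b d [] = d := by rw [pvWave.eq_def]; simp
      have hl0 : pvLoopB b (f+1) layers prev [] = layers := by simp [pvLoopB]
      rw [hw0, hl0]
      exact ⟨by rw [h1, pvPairsFrom_append_nil], hnd⟩
    · have hkeys : d.keys = layers.flatten ++ curr := by
        have h0 : d.keys = (pvPairsFrom 0 (layers ++ [curr])).map Prod.fst := by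
          rw [← h1]; rfl
        rw [h0, pvPairsFrom_keys]
        simp
      have hgetD : ∀ c ∈ curr, d.getD c 0 = (layers.length : Int) := by
        intro c hc
        have hmem : (c, (0 : Int) + (layers.length : Int)) ∈ d.items := by
          rw [h1]; exact pvPairsFrom_mem_last 0 layers curr c hc
        have := PySem.Dict.getD_of_mem_items d hmem hnd (0:Int)
        rw [this]
        ring
      obtain ⟨hlev, hnq, hqprops⟩ := pvLevelSim b layers prev curr d (layers.length : Int)
        hkeys hnd hgetD hprev hC1 hgood
      set nxt := pvNextB b prev curr with hnxt
      have hfreshq : ∀ x ∈ nxt, d.contains x = false := fun x hx => (hqprops x hx).2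
      have hpassq : ∀ x ∈ nxt, pvPass b x.1 x.2 = true := fun x hx => (hqprops x hx).1
      have h1' : (pvDIns d ((layers.length : Int)+1) nxt).items
          = pvPairsFrom 0 ((layers ++ [curr]) ++ [nxt]) := by
        rw [pv_items_dIns_fresh _ _ _ hnq hfreshq, h1,
          pvPairsFrom_append_singleton 0 (layers ++ [curr]) nxt]
        congr 1
        apply List.map_congr_left
        intro a _
        simp only [Prod.mk.injEq, true_and]
        simp only [List.length_append, List.length_cons, List.length_nil]
        push_cast
        ring
      have hflat : (layers ++ [curr]).flatten = layers.flatten ++ curr := by simp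
      have hC1' : ∀ k ∈ (layers ++ [curr]).flatten, k ∉ curr →
          ∀ m, pvEdge b k m → m ∈ (layers ++ [curr]).flatten := by
        intro k hk hkc m he
        rw [hflat] at hk ⊢
        rcases List.mem_append.1 hk with hk | hk
        · by_cases hp : k ∈ prev
          · rcases hC2 k hp m he with h | h
            · exact List.mem_append_left _ h
            · exact List.mem_append_right _ h
          · exact List.mem_append_left _ (hC1 k hk hp m he)
        · exact absurd hk hkc
      have hC2' : ∀ k ∈ curr, ∀ m, pvEdge b k m → m ∈ (layers ++ [curr]).flatten ∨ m ∈ nxt := by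
        intro k hk m he
        rcases pvNextB_complete b prev curr k m hk he with h | h | h
        · exact Or.inl (hflat ▸ List.mem_append_left _ (hprev m h))
        · exact Or.inl (hflat ▸ List.mem_append_right _ h)
        · exact Or.inr h
      have hwin' : ∀ k ∈ ((layers ++ [curr]) ++ [nxt]).flatten,
          k = c0 ∨ (0 ≤ k.1 ∧ k.1 < 19 ∧ 0 ≤ k.2 ∧ k.2 < 21) := by
        intro k hk
        rw [List.flatten_append] at hk
        rcases List.mem_append.1 hk with hk | hk
        · exact hwin k hk
        · simp only [List.flatten_cons, List.flatten_nil, List.append_nil] at hk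
          exact Or.inr (pvPass_window b k.1 k.2 (hpassq k hk))
      have ihres := ih (layers ++ [curr]) curr nxt (pvDIns d ((layers.length : Int)+1) nxt)
        h1'
        (pv_nodup_keys_dIns _ _ _ hnd)
        (by intro x hx; rw [hflat]; exact List.mem_append_right _ hx)
        hC1' hC2'
        (fun c hc => Or.inl (hpassq c hc))
        (by
          intro l hl
          rcases List.mem_append.1 hl with h | h
          · exact hne l h
          · rcases List.mem_singleton.1 h with rfl; exact hcurr)
        hwin'
        (by simp only [List.length_append, List.length_cons, List.length_nil]; omega)
      rw [pvWave.eq_def]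
      simp only [if_neg hcurr]
      rw [hlev]
      simp only [pvLoopB, if_neg hcurr]
      exact ihres

-- building the final dict from the layers (B's closing dict comprehension)
lemma pvBuild (ls : List (List (Int × Int))) :
    ∀ (i : Int) (d : PySem.Dict (Int × Int) Int), d.keys.Nodup →
    (∀ x ∈ ls.flatten, d.contains x = false) → ls.flatten.Nodup →
    ((PySem.List.enumerate ls i).foldl (fun d p => p.2.foldl (fun d c => d.insert c p.1) d) d).items
      = d.items ++ pvPairsFrom i ls := by
  induction ls with
  | nil => intro i d _ _ _; simp [PySem.List.enumerate_nil, pvPairsFrom]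
  | cons l ls ih =>
    intro i d hnd hfresh hflnd
    have hl1 : l.Nodup := ((List.nodup_append.1 (by simpa using hflnd)).1)
    have hdisj : ∀ x ∈ ls.flatten, x ∉ l := by
      intro x hx hxl
      have := (List.nodup_append.1 (by simpa using hflnd)).2.2
      exact this x hxl x hx rfl
    have hfl : ∀ x ∈ l, d.contains x = false := by
      intro x hx
      exact hfresh x (by simp [hx])
    rw [PySem.List.enumerate_cons]
    simp only [List.foldl_cons]
    have hitems : (l.foldl (fun d c => d.insert c i) d).items = d.items ++ l.map (fun n => (n, i)) :=
      pv_items_dIns_fresh i l d hl1 hfl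
    have hstep : (l.foldl (fun d c => d.insert c i) d) = pvDIns d i l := rfl
    rw [hstep]
    rw [ih (i + 1) (pvDIns d i l)
      (pv_nodup_keys_dIns _ _ _ hnd)
      (by
        intro x hx
        rw [pv_contains_foldl_insert]
        have h1 : d.contains x = false := hfresh x (by simp [hx])
        have h2 : x ∉ l := hdisj x hx
        simp [h1, h2])
      ((List.nodup_append.1 (by simpa using hflnd)).2.1)]
    rw [hstep] at hitems
    rw [hitems, pvPairsFrom, List.append_assoc]

-- ===== VERDICT (by name: the statement is the Claim_ definition above) =====
theorem compute_distance_map_spec : Claim_equal_compute_distance_map := by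
  intro tx ty b _
  unfold Spec_compute_distance_map compute_distance_map compute_distance_map_alt
  rw [pvLoopA_eq_pvWave]
  obtain ⟨hitems, hnd⟩ := pvMain b (tx, ty) 400 [] [] [(tx, ty)]
    (PySem.Dict.ofList [((tx, ty), (0:Int))])
    (by rfl)
    (by simp)
    (by intro x hx; cases hx)
    (by intro k hk; cases hk)
    (by intro k hk; cases hk)
    (by intro c _; exact Or.inr rfl)
    (by intro l hl; cases hl)
    (by
      intro k hk
      left
      simpa using hk)
    (by rfl)
  set LS := pvLoopB b 400 [] [] [(tx, ty)] with hLS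
  have hflnd : LS.flatten.Nodup := by
    have hk : (pvWave b (PySem.Dict.ofList [((tx, ty), (0:Int))]) [(tx, ty)]).keys
        = (pvPairsFrom 0 LS).map Prod.fst := by
      rw [← hitems]; rfl
    rw [hk, pvPairsFrom_keys] at hnd
    exact hnd
  rw [hitems, pvBuild LS 0 PySem.Dict.empty (by simp) (by intro x _; rfl) hflnd]
  rw [show (PySem.Dict.empty : PySem.Dict (Int × Int) Int).items = [] from rfl]
  rfl
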